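-- pv_equiv track=rewrite | github.com/ljeanette15/chemical-graph | utils/simulation_tools.py | get_measurement_dict_from_H
-- ===== SOURCE A (Python) =====
-- def get_measurement_dict_from_H(H):
--
--     measurements = {}
--
--     for key in H.keys():
--         pstring = "I" * 8
--         for pchar in key:
--             pstring = pstring[:pchar[0]] + pchar[1] + pstring[pchar[0] + 1:]
--         measurements[pstring] = [pstring]
--
--     return measurements
-- ===== SOURCE B (Python) =====
-- def get_measurement_dict_from_H(H):
--     def pauli_string(pstring, entries):
--         if not entries:
--             return pstring
--         (p, r), rest = entries[0], entries[1:]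
--         return pauli_string(pstring[:p] + r + pstring[p + 1:], rest)
--
--     return {s: [s] for s in (pauli_string("I" * 8, list(key)) for key in H)}
-- ===== Notes on version B (the rewrite author's own statement) =====
-- stated objective: idiomatic
-- what changed: A fills a dict imperatively with two nested for-loops, re-splicing an accumulator string in place; B factors the per-key string construction into a recursive helper and assembles the whole result in a single dict comprehension over the keys.
import Mathlib
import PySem

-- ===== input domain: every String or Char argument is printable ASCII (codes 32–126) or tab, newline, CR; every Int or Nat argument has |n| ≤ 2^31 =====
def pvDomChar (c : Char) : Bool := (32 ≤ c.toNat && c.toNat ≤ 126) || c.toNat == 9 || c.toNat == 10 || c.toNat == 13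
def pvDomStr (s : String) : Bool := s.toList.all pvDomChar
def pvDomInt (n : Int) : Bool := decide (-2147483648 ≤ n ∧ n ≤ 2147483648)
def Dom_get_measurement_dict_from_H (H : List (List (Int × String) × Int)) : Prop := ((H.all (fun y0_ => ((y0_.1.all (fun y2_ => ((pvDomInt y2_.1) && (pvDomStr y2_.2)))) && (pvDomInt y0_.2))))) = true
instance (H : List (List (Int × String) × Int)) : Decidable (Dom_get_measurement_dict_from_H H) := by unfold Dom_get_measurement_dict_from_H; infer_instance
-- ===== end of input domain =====

-- B factors the per-key string construction into a recursive helper (same slice-splice step)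
-- and builds the result as one dict comprehension instead of A's nested loops that mutate a
-- dict in place (objective: idiomatic; return value only, neither version mutates its argument).

-- ===== PORT A =====
-- pstring[:pchar[0]] + pchar[1] + pstring[pchar[0] + 1:]  (string kept as its code-point list)
def get_measurement_dict_from_H (H : List (List (Int × String) × Int)) : List (String × List String) :=
  (H.foldl
    (fun (m : PySem.Dict String (List String)) (key : List (Int × String) × Int) =>
      let pstring := String.ofList
        (key.1.foldl
          (fun (s : List Char) (pchar : Int × String) =>
            PySem.List.slice s none (some pchar.1) ++ pchar.2.toList
              ++ PySem.List.slice s (some (pchar.1 + 1)) none)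
          "IIIIIIII".toList)
      m.insert pstring [pstring])
    PySem.Dict.empty).items

-- ===== PORT B =====
-- pauli_string(pstring, entries): recursion over the key entries, same Python slicing
def pvPauliString : List Char → List (Int × String) → List Char
  | pstring, [] => pstring
  | pstring, (p, r) :: rest =>
      pvPauliString
        (PySem.List.slice pstring none (some p) ++ r.toList
          ++ PySem.List.slice pstring (some (p + 1)) none)
        rest

-- {s: [s] for s in (pauli_string("I" * 8, list(key)) for key in H)}
def get_measurement_dict_from_H_alt (H : List (List (Int × String) × Int)) : List (String × List String) :=
  (PySem.Dict.ofList
    (H.map (fun key =>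
      let s := String.ofList (pvPauliString "IIIIIIII".toList key.1)
      (s, [s])))).items

-- ===== PRECONDITION & SPEC =====
def Spec_get_measurement_dict_from_H (H : List (List (Int × String) × Int)) (out : List (String × List String)) : Prop := out = get_measurement_dict_from_H_alt H
instance (H : List (List (Int × String) × Int)) (out : List (String × List String)) : Decidable (Spec_get_measurement_dict_from_H H out) := by
  unfold Spec_get_measurement_dict_from_H; infer_instance

-- ===== CLAIM =====
def Claim_equal_get_measurement_dict_from_H : Prop := ∀ (H : List (List (Int × String) × Int)), Dom_get_measurement_dict_from_H H → Spec_get_measurement_dict_from_H H (get_measurement_dict_from_H H)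

-- ===== LEMMAS AND PROOFS =====

-- B's recursive helper computes A's inner fold
theorem pvPauliString_eq_foldl (entries : List (Int × String)) (s : List Char) :
    pvPauliString s entries
      = entries.foldl
          (fun (s : List Char) (pchar : Int × String) =>
            PySem.List.slice s none (some pchar.1) ++ pchar.2.toList
              ++ PySem.List.slice s (some (pchar.1 + 1)) none)
          s := by
  induction entries generalizing s with
  | nil => rfl
  | cons e rest ih =>
    obtain ⟨p, r⟩ := e
    simp only [pvPauliString, List.foldl_cons, ih]

-- ===== VERDICT =====
theorem get_measurement_dict_from_H_spec : Claim_equal_get_measurement_dict_from_H := by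
  intro H _
  unfold Spec_get_measurement_dict_from_H get_measurement_dict_from_H get_measurement_dict_from_H_alt
  simp only [PySem.Dict.ofList, PySem.Dict.update, List.foldl_map, pvPauliString_eq_foldl]
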